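-- pv_equiv track=rewrite | github.com/077xym/algo-learn | stableMatching/main.py | is_prefer
-- ===== SOURCE A (Python) =====
-- def is_prefer(man1, man2, w, preference_woman: dict):
--     pref_list = preference_woman[w]
--     m2_found = False
--     for name in pref_list:
--         if man1 == name and not m2_found:
--             return True
--         if m2_found:
--             return False
--         if man2 == name:
--             m2_found = True
--     return False
-- ===== SOURCE B (Python) =====
-- def is_prefer(man1, man2, w, preference_woman: dict):
--     pref_list = preference_woman[w]
--     if man1 not in pref_list:
--         return False
--     if man2 not in pref_list:
--         return True
--     return pref_list.index(man1) <= pref_list.index(man2)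
-- ===== Notes on version B (the rewrite author's own statement) =====
-- stated objective: simpler
-- what changed: Replaced the single stateful scan with a flag by membership tests plus a first-occurrence index comparison (index(man1) <= index(man2)).
import Mathlib
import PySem

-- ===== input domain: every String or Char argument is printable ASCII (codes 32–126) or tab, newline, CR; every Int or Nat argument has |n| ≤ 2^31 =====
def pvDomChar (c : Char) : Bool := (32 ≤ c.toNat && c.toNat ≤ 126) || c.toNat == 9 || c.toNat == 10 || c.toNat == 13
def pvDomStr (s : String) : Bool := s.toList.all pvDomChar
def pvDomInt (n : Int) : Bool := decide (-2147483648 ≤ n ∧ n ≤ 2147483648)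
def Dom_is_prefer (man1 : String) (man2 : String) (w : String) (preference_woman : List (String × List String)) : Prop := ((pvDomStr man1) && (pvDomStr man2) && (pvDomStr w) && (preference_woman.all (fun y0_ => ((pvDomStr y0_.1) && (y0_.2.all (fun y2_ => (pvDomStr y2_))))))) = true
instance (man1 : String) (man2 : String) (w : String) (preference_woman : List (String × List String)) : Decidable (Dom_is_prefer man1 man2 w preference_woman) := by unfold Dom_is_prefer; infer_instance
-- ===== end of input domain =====

-- B replaces A's stateful flag scan by membership tests plus a first-occurrence index comparison (simpler decomposition, same cost).

-- ===== PORT A =====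
-- the for-loop of A, carrying the m2_found flag
def isPreferLoopA (man1 man2 : String) (m2_found : Bool) : List String → Bool
  | [] => false
  | name :: rest =>
    if man1 == name && !m2_found then true
    else if m2_found then false
    else if man2 == name then isPreferLoopA man1 man2 true rest
    else isPreferLoopA man1 man2 m2_found rest

def is_prefer (man1 : String) (man2 : String) (w : String) (preference_woman : List (String × List String)) : Bool :=
  match PySem.Dict.get? (PySem.Dict.mk preference_woman) w with
  | none => false  -- Python raises KeyError here; excluded by Pre_is_prefer
  | some pref_list => isPreferLoopA man1 man2 false pref_list

-- ===== PORT B =====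
def is_prefer_alt (man1 : String) (man2 : String) (w : String) (preference_woman : List (String × List String)) : Bool :=
  match PySem.Dict.get? (PySem.Dict.mk preference_woman) w with
  | none => false  -- Python raises KeyError here; excluded by Pre_is_prefer
  | some pref_list =>
    if !(pref_list.contains man1) then false
    else if !(pref_list.contains man2) then true
    else
      match PySem.List.index? pref_list man1, PySem.List.index? pref_list man2 with
      | some i, some j => decide (i ≤ j)
      | _, _ => false  -- unreachable: both membership tests above passed

-- ===== PRECONDITION & SPEC =====
-- Pre_ excludes exactly the inputs where w is not a key of preference_woman, on which A (and B) raise KeyError.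
def Pre_is_prefer (man1 : String) (man2 : String) (w : String) (preference_woman : List (String × List String)) : Prop :=
  (PySem.Dict.mk preference_woman).contains w = true
instance (man1 : String) (man2 : String) (w : String) (preference_woman : List (String × List String)) : Decidable (Pre_is_prefer man1 man2 w preference_woman) := by unfold Pre_is_prefer; infer_instance
def pvWitness_is_prefer : String × String × String × (List (String × List String)) :=
  ("alice", "bob", "w", [("w", ["bob", "alice"])])
def Spec_is_prefer (man1 : String) (man2 : String) (w : String) (preference_woman : List (String × List String)) (out : Bool) : Prop := out = is_prefer_alt man1 man2 w preference_woman
instance (man1 : String) (man2 : String) (w : String) (preference_woman : List (String × List String)) (out : Bool) : Decidable (Spec_is_prefer man1 man2 w preference_woman out) := by unfold Spec_is_prefer; infer_instance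

-- ===== CLAIM (what is proved, stated in full; the proofs are below) =====
def Claim_equal_is_prefer : Prop := ∀ (man1 : String) (man2 : String) (w : String) (preference_woman : List (String × List String)), Dom_is_prefer man1 man2 w preference_woman → Pre_is_prefer man1 man2 w preference_woman → Spec_is_prefer man1 man2 w preference_woman (is_prefer man1 man2 w preference_woman)

-- ===== LEMMAS AND PROOFS =====

-- B's decision on a bare preference list (= the some-branch of is_prefer_alt)
def altCore (man1 man2 : String) (l : List String) : Bool :=
  if !(l.contains man1) then false
  else if !(l.contains man2) then true
  else
    match PySem.List.index? l man1, PySem.List.index? l man2 with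
    | some i, some j => decide (i ≤ j)
    | _, _ => false

theorem loopA_true (man1 man2 : String) (l : List String) :
    isPreferLoopA man1 man2 true l = false := by
  cases l with
  | nil => simp [isPreferLoopA]
  | cons b bs => simp [isPreferLoopA]

theorem loopA_eq_altCore (man1 man2 : String) (l : List String) :
    isPreferLoopA man1 man2 false l = altCore man1 man2 l := by
  induction l with
  | nil => simp [isPreferLoopA, altCore]
  | cons name rest ih =>
    by_cases h1 : man1 = name
    · subst h1
      have hl : isPreferLoopA man1 man2 false (man1 :: rest) = true := by
        simp [isPreferLoopA]
      rw [hl]; symm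
      have hc1 : (man1 :: rest).contains man1 = true := by simp
      rcases hj : PySem.List.index? (man1 :: rest) man2 with _ | j
      · have hm2 : man2 ∉ man1 :: rest := (PySem.List.index?_eq_none_iff _ _).mp hj
        have hc2 : (man1 :: rest).contains man2 = false := by simpa using hm2
        unfold altCore
        rw [hc1, hc2]
        simp
      · have hm2 : man2 ∈ man1 :: rest :=
          (PySem.List.index?_isSome_iff _ _).mp (by rw [hj]; rfl)
        have hc2 : (man1 :: rest).contains man2 = true := by simpa using hm2
        unfold altCore
        rw [hc1, hc2, PySem.List.index?_cons_self, hj]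
        simp
    · by_cases h2 : man2 = name
      · subst h2
        have hne : man2 ≠ man1 := fun h => h1 h.symm
        have hl : isPreferLoopA man1 man2 false (man2 :: rest) = false := by
          simp [isPreferLoopA, h1, loopA_true]
        rw [hl]; symm
        have hc2 : (man2 :: rest).contains man2 = true := by simp
        have hi : PySem.List.index? (man2 :: rest) man1
            = (PySem.List.index? rest man1).map (· + 1) :=
          PySem.List.index?_cons_of_ne rest hne
        rcases hr : PySem.List.index? rest man1 with _ | i
        · have hm1 : man1 ∉ man2 :: rest := by
            refine (PySem.List.index?_eq_none_iff _ _).mp ?_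
            rw [hi, hr]; rfl
          have hc1 : (man2 :: rest).contains man1 = false := by simpa using hm1
          unfold altCore
          rw [hc1]
          simp
        · have hm1 : man1 ∈ rest :=
            (PySem.List.index?_isSome_iff _ _).mp (by rw [hr]; rfl)
          have hc1 : (man2 :: rest).contains man1 = true := by simp [hm1]
          unfold altCore
          rw [hc1, hc2, hi, hr, PySem.List.index?_cons_self]
          simp
      · have hn1 : name ≠ man1 := fun h => h1 h.symm
        have hn2 : name ≠ man2 := fun h => h2 h.symm
        have hl : isPreferLoopA man1 man2 false (name :: rest)
            = isPreferLoopA man1 man2 false rest := by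
          simp [isPreferLoopA, h1, h2]
        rw [hl, ih]
        unfold altCore
        rw [PySem.List.index?_cons_of_ne rest hn1, PySem.List.index?_cons_of_ne rest hn2]
        have hc1 : (name :: rest).contains man1 = rest.contains man1 := by
          rw [List.contains_cons, beq_eq_false_iff_ne.mpr h1, Bool.false_or]
        have hc2 : (name :: rest).contains man2 = rest.contains man2 := by
          rw [List.contains_cons, beq_eq_false_iff_ne.mpr h2, Bool.false_or]
        rw [hc1, hc2]
        rcases PySem.List.index? rest man1 with _ | i <;>
          rcases PySem.List.index? rest man2 with _ | j <;> simp

-- ===== VERDICT (by name: the statement is the Claim_ definition above) =====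
theorem is_prefer_spec : Claim_equal_is_prefer := by
  intro man1 man2 w pw _ _
  unfold Spec_is_prefer is_prefer is_prefer_alt
  rcases PySem.Dict.get? (PySem.Dict.mk pw) w with _ | l
  · rfl
  · simpa [altCore] using loopA_eq_altCore man1 man2 l
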